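-- pv_equiv track=rewrite | github.com/MrBrantCode/unitest_baseline | mut_generate/mist_train_taco/taco_11743/solution.py | are_dices_unique
-- ===== SOURCE A (Python) =====
-- def are_dices_unique(dices):
--     def diffDice(orgDice, newDice):
--         ptn = [[1, 2, 3, 4, 5, 6], [2, 6, 3, 4, 1, 5], [3, 6, 5, 2, 1, 4], [4, 6, 2, 5, 1, 3], [5, 6, 4, 3, 1, 2], [6, 2, 4, 3, 5, 1]]
--         flg = False
--         tmpDice = [0, 0, 0, 0, 0, 0]
--         for i in range(6):
--             for (idx, j) in enumerate(ptn[i]):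
--                 tmpDice[idx] = newDice[j - 1]
--             if orgDice[0] != tmpDice[0] and orgDice[5] != tmpDice[5]:
--                 continue
--             if orgDice[0] == tmpDice[0] and orgDice[5] != tmpDice[5] or (orgDice[0] != tmpDice[0] and orgDice[5] == tmpDice[5]):
--                 continue
--             if orgDice[1:5] == [tmpDice[1], tmpDice[2], tmpDice[3], tmpDice[4]] or orgDice[1:5] == [tmpDice[3], tmpDice[1], tmpDice[4], tmpDice[2]] or orgDice[1:5] == [tmpDice[2], tmpDice[4], tmpDice[1], tmpDice[3]] or (orgDice[1:5] == [tmpDice[4], tmpDice[3], tmpDice[2], tmpDice[1]]):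
--                 flg = True
--                 break
--         return flg
--
--     n = len(dices)
--     for i in range(1, n):
--         if diffDice(dices[0], dices[i]):
--             return False
--     return True
-- ===== SOURCE B (Python) =====
-- def are_dices_unique(dices):
--     # Generate all 24 orientations of the first die by composing two elementary
--     # cube rotations, then test the remaining dice for membership.
--     def roll(d):
--         t, f, r, l, b, u = d
--         return (f, u, r, l, t, b)
--
--     def turn(d):
--         t, f, r, l, b, u = d
--         return (t, r, b, f, l, u)
--
--     if len(dices) <= 1:
--         return True
--     d0 = tuple(dices[0][:6])
--     tops = [d0, roll(d0), roll(roll(d0)), roll(roll(roll(d0))),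
--             roll(turn(d0)), roll(turn(turn(turn(d0))))]
--     rots = []
--     for t in tops:
--         for _ in range(4):
--             rots.append(t)
--             t = turn(t)
--     return all(tuple(d[:6]) not in rots for d in dices[1:])
-- ===== Notes on version B (the rewrite author's own statement) =====
-- stated objective: alternative
-- what changed: Replaces A's hard-coded 6-row pattern table with per-row top/bottom continue-logic and four side-cycle comparisons by explicit cube-rotation generation: two elementary rotations (roll, turn) generate all 24 orientations of the first die once, and every other die is tested by plain membership of its 6-face tuple in that list.
-- outside the precondition, e.g. on are_dices_unique([[1, 2, 3, 4, 5, 6], [1, 2, 3, 4, 5, 6], [1]]): A returns False, B returns False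
import Mathlib
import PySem

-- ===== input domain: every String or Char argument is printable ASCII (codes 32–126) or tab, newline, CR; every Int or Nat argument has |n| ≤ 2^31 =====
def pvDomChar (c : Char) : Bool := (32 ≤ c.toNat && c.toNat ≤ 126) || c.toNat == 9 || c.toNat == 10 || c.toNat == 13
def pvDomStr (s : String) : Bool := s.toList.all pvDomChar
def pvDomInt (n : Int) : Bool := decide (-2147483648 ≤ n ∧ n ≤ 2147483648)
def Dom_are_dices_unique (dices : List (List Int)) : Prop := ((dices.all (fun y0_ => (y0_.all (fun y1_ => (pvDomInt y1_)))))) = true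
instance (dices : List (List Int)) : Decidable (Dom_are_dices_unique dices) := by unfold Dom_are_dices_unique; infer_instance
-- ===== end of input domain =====

-- B replaces A's hard-coded orientation/pattern table by generating all 24 cube
-- rotations of the first die from two elementary rotations and testing membership
-- (objective: alternative, same cost; no mutation of the argument is observable).

-- ===== PORT A =====
-- list indexing; exact on Pre_ (every index used is in range there)
def pvGd (xs : List Int) (i : Nat) : Int := xs.getD i 0

def pvPtn : List (List Nat) :=
  [[1, 2, 3, 4, 5, 6], [2, 6, 3, 4, 1, 5], [3, 6, 5, 2, 1, 4],
   [4, 6, 2, 5, 1, 3], [5, 6, 4, 3, 1, 2], [6, 2, 4, 3, 5, 1]]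

-- the `for i in range(6)` loop of diffDice, with `continue`/`break` as recursion
def pvDiffLoop (org new : List Int) : List (List Nat) → Bool
  | [] => false
  | row :: rest =>
    let tmp := row.map (fun j => pvGd new (j - 1))
    if ¬(pvGd org 0 = pvGd tmp 0) ∧ ¬(pvGd org 5 = pvGd tmp 5) then
      pvDiffLoop org new rest
    else if (pvGd org 0 = pvGd tmp 0 ∧ ¬(pvGd org 5 = pvGd tmp 5)) ∨
            (¬(pvGd org 0 = pvGd tmp 0) ∧ pvGd org 5 = pvGd tmp 5) then
      pvDiffLoop org new rest
    else if PySem.List.slice org (some 1) (some 5) = [pvGd tmp 1, pvGd tmp 2, pvGd tmp 3, pvGd tmp 4] ∨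
            PySem.List.slice org (some 1) (some 5) = [pvGd tmp 3, pvGd tmp 1, pvGd tmp 4, pvGd tmp 2] ∨
            PySem.List.slice org (some 1) (some 5) = [pvGd tmp 2, pvGd tmp 4, pvGd tmp 1, pvGd tmp 3] ∨
            PySem.List.slice org (some 1) (some 5) = [pvGd tmp 4, pvGd tmp 3, pvGd tmp 2, pvGd tmp 1] then
      true
    else
      pvDiffLoop org new rest

def pvDiffDice (org new : List Int) : Bool := pvDiffLoop org new pvPtn

-- `for i in range(1, n): if diffDice(dices[0], dices[i]): return False`
def pvOuter (d0 : List Int) : List (List Int) → Bool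
  | [] => true
  | d :: rest => if pvDiffDice d0 d then false else pvOuter d0 rest

def are_dices_unique (dices : List (List Int)) : Bool :=
  match dices with
  | [] => true
  | d0 :: rest => pvOuter d0 rest

-- ===== PORT B =====
def pvRoll (d : List Int) : List Int :=
  match d with
  | [t, f, r, l, b, u] => [f, u, r, l, t, b]
  | x => x

def pvTurn (d : List Int) : List Int :=
  match d with
  | [t, f, r, l, b, u] => [t, r, b, f, l, u]
  | x => x

def pvRots (d0 : List Int) : List (List Int) :=
  let tops := [d0, pvRoll d0, pvRoll (pvRoll d0), pvRoll (pvRoll (pvRoll d0)),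
               pvRoll (pvTurn d0), pvRoll (pvTurn (pvTurn (pvTurn d0)))]
  tops.flatMap (fun t => [t, pvTurn t, pvTurn (pvTurn t), pvTurn (pvTurn (pvTurn t))])

def are_dices_unique_alt (dices : List (List Int)) : Bool :=
  if dices.length ≤ 1 then true
  else
    match dices with
    | [] => true
    | d0 :: rest =>
      let rots := pvRots (d0.take 6)    -- d[:6] is List.take 6
      rest.all (fun d => !(rots.contains (d.take 6)))

-- ===== PRECONDITION & SPEC =====
-- Pre_ excludes inputs with at least two dice where some die has fewer than 6 faces:
-- on those A raises IndexError, except when the short die comes after an earlier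
-- rotation match, where A returns False and B (short-circuiting identically) also
-- returns False — Pre_ is slightly narrower than the raising set for that reason.
def Pre_are_dices_unique (dices : List (List Int)) : Prop :=
  dices.length ≤ 1 ∨ ∀ d ∈ dices, 6 ≤ d.length
instance (dices : List (List Int)) : Decidable (Pre_are_dices_unique dices) := by
  unfold Pre_are_dices_unique; infer_instance

def pvWitness_are_dices_unique : List (List Int) :=
  [[1, 2, 3, 4, 5, 6], [2, 6, 3, 5, 1, 4]]

def Spec_are_dices_unique (dices : List (List Int)) (out : Bool) : Prop := out = are_dices_unique_alt dices
instance (dices : List (List Int)) (out : Bool) : Decidable (Spec_are_dices_unique dices out) := by unfold Spec_are_dices_unique; infer_instance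

-- ===== CLAIM (what is proved, stated in full; the proofs are below) =====
def Claim_equal_are_dices_unique : Prop := ∀ (dices : List (List Int)), Dom_are_dices_unique dices → Pre_are_dices_unique dices → Spec_are_dices_unique dices (are_dices_unique dices)

-- ===== LEMMAS AND PROOFS =====

-- one row of diffDice: the two continue-conditions collapse to top&bottom match
lemma pv_step (a b c d : Int) (s : Prop) [Decidable s] (k : Bool) :
    ((if ¬(a = b) ∧ ¬(c = d) then k
      else if (a = b ∧ ¬(c = d)) ∨ (¬(a = b) ∧ c = d) then k
      else if s then true else k) = true)
      ↔ ((a = b ∧ c = d ∧ s) ∨ k = true) := by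
  by_cases h1 : a = b <;> by_cases h2 : c = d <;> by_cases h3 : s <;> simp_all

-- the row condition after the two continue-tests (proof-side restatement)
def pvCond (org new : List Int) (row : List Nat) : Prop :=
  pvGd org 0 = pvGd (row.map fun j => pvGd new (j - 1)) 0 ∧
  pvGd org 5 = pvGd (row.map fun j => pvGd new (j - 1)) 5 ∧
  (PySem.List.slice org (some 1) (some 5) =
      [pvGd (row.map fun j => pvGd new (j - 1)) 1, pvGd (row.map fun j => pvGd new (j - 1)) 2,
       pvGd (row.map fun j => pvGd new (j - 1)) 3, pvGd (row.map fun j => pvGd new (j - 1)) 4] ∨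
   PySem.List.slice org (some 1) (some 5) =
      [pvGd (row.map fun j => pvGd new (j - 1)) 3, pvGd (row.map fun j => pvGd new (j - 1)) 1,
       pvGd (row.map fun j => pvGd new (j - 1)) 4, pvGd (row.map fun j => pvGd new (j - 1)) 2] ∨
   PySem.List.slice org (some 1) (some 5) =
      [pvGd (row.map fun j => pvGd new (j - 1)) 2, pvGd (row.map fun j => pvGd new (j - 1)) 4,
       pvGd (row.map fun j => pvGd new (j - 1)) 1, pvGd (row.map fun j => pvGd new (j - 1)) 3] ∨
   PySem.List.slice org (some 1) (some 5) =
      [pvGd (row.map fun j => pvGd new (j - 1)) 4, pvGd (row.map fun j => pvGd new (j - 1)) 3,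
       pvGd (row.map fun j => pvGd new (j - 1)) 2, pvGd (row.map fun j => pvGd new (j - 1)) 1])

lemma pv_loop_cons (org new : List Int) (row : List Nat) (rest : List (List Nat)) :
    (pvDiffLoop org new (row :: rest) = true) ↔
      (pvCond org new row ∨ pvDiffLoop org new rest = true) := by
  show ((if _ then pvDiffLoop org new rest
         else if _ then pvDiffLoop org new rest
         else if _ then true else pvDiffLoop org new rest) = true) ↔ _
  exact pv_step _ _ _ _ _ _

lemma pv_slice_six (o0 o1 o2 o3 o4 o5 : Int) (r : List Int) :
    PySem.List.slice (o0 :: o1 :: o2 :: o3 :: o4 :: o5 :: r) (some 1) (some 5) = [o1, o2, o3, o4] := by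
  rw [PySem.List.slice_of_nonneg _ (by omega) (by omega) (by simp; omega) (by simp; omega)]
  simp

set_option maxRecDepth 200000 in
set_option maxHeartbeats 2000000 in
lemma pv_diff_eq_mem (org new : List Int) (ho : 6 ≤ org.length) (hn : 6 ≤ new.length) :
    pvDiffDice org new = (pvRots (org.take 6)).contains (new.take 6) := by
  obtain ⟨o0, o1, o2, o3, o4, o5, or', rfl⟩ :
      ∃ a b c d e f r, org = a :: b :: c :: d :: e :: f :: r := by
    match org, ho with
    | a :: b :: c :: d :: e :: f :: r, _ => exact ⟨a, b, c, d, e, f, r, rfl⟩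
  obtain ⟨n0, n1, n2, n3, n4, n5, nr', rfl⟩ :
      ∃ a b c d e f r, new = a :: b :: c :: d :: e :: f :: r := by
    match new, hn with
    | a :: b :: c :: d :: e :: f :: r, _ => exact ⟨a, b, c, d, e, f, r, rfl⟩
  rw [← Bool.coe_iff_coe]
  show pvDiffLoop _ _ pvPtn = true ↔ _
  rw [show pvPtn = [[1, 2, 3, 4, 5, 6], [2, 6, 3, 4, 1, 5], [3, 6, 5, 2, 1, 4],
        [4, 6, 2, 5, 1, 3], [5, 6, 4, 3, 1, 2], [6, 2, 4, 3, 5, 1]] from rfl,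
      pv_loop_cons, pv_loop_cons, pv_loop_cons, pv_loop_cons, pv_loop_cons, pv_loop_cons]
  simp only [pvDiffLoop, pvCond, Nat.reduceSub, pvGd, List.map, List.getD,
    List.getElem?_cons_zero, List.getElem?_cons_succ, Option.getD_some, pv_slice_six,
    pvRots, pvRoll, pvTurn, List.take, List.flatMap, List.cons_append, List.nil_append,
    List.flatten_cons, List.flatten_nil, List.append_nil, List.contains_cons, List.contains_nil, Bool.or_eq_true, beq_iff_eq, or_false,
    List.cons.injEq, and_true, Bool.false_eq_true]
  constructor
  · intro h
    obtain h|h|h|h|h|h := h <;> obtain ⟨h0, h5, h|h|h|h⟩ := h <;>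
      obtain ⟨a, b, c, d⟩ := h <;> subst_vars <;> simp
  · intro h
    rcases h with h|h|h|h|h|h|h|h|h|h|h|h|h|h|h|h|h|h|h|h|h|h|h|h <;>
      obtain ⟨a, b, c, d, e, f⟩ := h <;> subst_vars <;> simp

lemma pv_outer_eq (d0 : List Int) (rest : List (List Int)) (h0 : 6 ≤ d0.length)
    (h : ∀ d ∈ rest, 6 ≤ d.length) :
    pvOuter d0 rest = rest.all (fun d => !((pvRots (d0.take 6)).contains (d.take 6))) := by
  induction rest with
  | nil => rfl
  | cons d rest ih =>
    have hd : 6 ≤ d.length := h d (by simp)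
    have hrest : ∀ x ∈ rest, 6 ≤ x.length := fun x hx => h x (by simp [hx])
    rw [List.all_cons, pvOuter, pv_diff_eq_mem d0 d h0 hd, ih hrest]
    cases hc : (pvRots (d0.take 6)).contains (d.take 6) <;> simp

-- ===== VERDICT (by name: the statement is the Claim_ definition above) =====
theorem are_dices_unique_spec : Claim_equal_are_dices_unique := by
  intro dices _ hpre
  unfold Spec_are_dices_unique
  match dices with
  | [] => rfl
  | [d0] => rfl
  | d0 :: d1 :: rest =>
    rcases hpre with h | h
    · simp at h
    · have h0 : 6 ≤ d0.length := h d0 (by simp)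
      have hr : ∀ d ∈ d1 :: rest, 6 ≤ d.length := fun d hd => h d (by simp at hd ⊢; tauto)
      show pvOuter d0 (d1 :: rest) = are_dices_unique_alt (d0 :: d1 :: rest)
      rw [pv_outer_eq d0 (d1 :: rest) h0 hr]
      simp [are_dices_unique_alt]
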